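-- pv_equiv track=rewrite | github.com/vrthra/Cmimid | src/treeminer.py | last_comparisons
-- ===== SOURCE A (Python) =====
-- def last_comparisons(comparisons):
--     HEURISTIC = True
--     last_cmp_only = {}
--     last_idx = {}
--
--     # get the last indexes compared in methods.
--     # first, for each method, find the index that
--     # was accessed in that method invocation last.
--     for idx, char, mid in comparisons:
--         if mid in last_idx:
--             if idx > last_idx[mid]:
--                 last_idx[mid] = idx
--         else:
--             last_idx[mid] = idx
--
--     # next, for each index, find the method that
--     # accessed it last.
--     for idx, char, mid in comparisons:
--         if HEURISTIC:
--             if idx in last_cmp_only: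
--                 if last_cmp_only[idx] > mid:
--                     # do not clobber children unless it was the last character
--                     # for that child.
--                     if last_idx[mid] > idx:
--                         # if it was the last index, may be the child used it
--                         # as a boundary check.
--                         continue
--         last_cmp_only[idx] = mid
--     return last_cmp_only
-- ===== SOURCE B (Python) =====
-- def last_comparisons(comparisons):
--     # Phase 1: last index accessed per method (same as A's first pass).
--     last_idx = {}
--     for idx, char, mid in comparisons:
--         if mid in last_idx:
--             if idx > last_idx[mid]:
--                 last_idx[mid] = idx
--         else:
--             last_idx[mid] = idx
--
--     # Phase 2: group the method ids per index, preserving encounter order.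
--     by_idx = {}
--     for idx, char, mid in comparisons:
--         by_idx.setdefault(idx, []).append(mid)
--
--     # Phase 3: per-index local reduction choosing the method that accessed it last.
--     result = {}
--     for idx, mids in by_idx.items():
--         cur = mids[0]
--         for mid in mids[1:]:
--             if cur > mid and last_idx[mid] > idx:
--                 continue
--             cur = mid
--         result[idx] = cur
--     return result
-- ===== Notes on version B (the rewrite author's own statement) =====
-- stated objective: alternative
-- what changed: Replaces A's flat second pass that mutates one global dict under a skip heuristic with a group-then-reduce decomposition: the method ids are grouped per index (encounter order preserved) and each index's winner is computed by an independent left fold over its own group.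
import Mathlib
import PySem

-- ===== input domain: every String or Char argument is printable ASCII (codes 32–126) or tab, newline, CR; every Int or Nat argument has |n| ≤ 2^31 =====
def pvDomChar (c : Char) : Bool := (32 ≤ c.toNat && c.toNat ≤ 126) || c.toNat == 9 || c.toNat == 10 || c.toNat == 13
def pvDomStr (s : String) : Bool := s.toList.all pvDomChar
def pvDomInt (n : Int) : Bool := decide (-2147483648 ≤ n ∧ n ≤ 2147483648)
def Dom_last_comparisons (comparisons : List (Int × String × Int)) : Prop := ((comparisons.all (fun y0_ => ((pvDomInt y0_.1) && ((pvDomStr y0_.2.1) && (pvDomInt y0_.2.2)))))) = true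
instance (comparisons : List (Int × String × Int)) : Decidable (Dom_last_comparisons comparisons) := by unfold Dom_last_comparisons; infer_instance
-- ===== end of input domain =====

-- ===== PORT A =====
-- B re-decomposes A's flat second pass into group-by-index + per-index reductions (objective: alternative).
def last_comparisons (comparisons : List (Int × String × Int)) : List (Int × Int) :=
  -- for idx, char, mid in comparisons: update last_idx[mid]
  let last_idx : PySem.Dict Int Int := comparisons.foldl (fun d t =>
    if d.contains t.2.2 then
      if t.1 > d.getD t.2.2 0 then d.insert t.2.2 t.1 else d
    else d.insert t.2.2 t.1) PySem.Dict.empty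
  -- for idx, char, mid in comparisons: the HEURISTIC loop on last_cmp_only
  let last_cmp_only : PySem.Dict Int Int := comparisons.foldl (fun d t =>
    if d.contains t.1 then
      if d.getD t.1 0 > t.2.2 then
        if last_idx.getD t.2.2 0 > t.1 then d      -- continue
        else d.insert t.1 t.2.2
      else d.insert t.1 t.2.2
    else d.insert t.1 t.2.2) PySem.Dict.empty
  last_cmp_only.items

-- ===== PORT B =====
def last_comparisons_alt (comparisons : List (Int × String × Int)) : List (Int × Int) :=
  -- Phase 1: last index accessed per method (same loop as A's first pass)
  let last_idx : PySem.Dict Int Int := comparisons.foldl (fun d t =>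
    if d.contains t.2.2 then
      if t.1 > d.getD t.2.2 0 then d.insert t.2.2 t.1 else d
    else d.insert t.2.2 t.1) PySem.Dict.empty
  -- Phase 2: by_idx.setdefault(idx, []).append(mid)
  let by_idx : PySem.Dict Int (List Int) := comparisons.foldl (fun d t =>
    d.modify t.1 [] (fun ms => ms ++ [t.2.2])) PySem.Dict.empty
  -- Phase 3: per-index fold; mids is never empty, so mids[0] is total (headD)
  let result : PySem.Dict Int Int := by_idx.items.foldl (fun r p =>
    r.insert p.1 ((p.2.tail).foldl (fun cur mid =>
      if cur > mid ∧ last_idx.getD mid 0 > p.1 then cur else mid) (p.2.headD 0))) PySem.Dict.empty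
  result.items

-- ===== PRECONDITION & SPEC =====
def Spec_last_comparisons (comparisons : List (Int × String × Int)) (out : List (Int × Int)) : Prop := out = last_comparisons_alt comparisons
instance (comparisons : List (Int × String × Int)) (out : List (Int × Int)) : Decidable (Spec_last_comparisons comparisons out) := by unfold Spec_last_comparisons; infer_instance

-- ===== CLAIM (what is proved, stated in full; the proofs are below) =====
def Claim_equal_last_comparisons : Prop := ∀ (comparisons : List (Int × String × Int)), Dom_last_comparisons comparisons → Spec_last_comparisons comparisons (last_comparisons comparisons)

-- ===== LEMMAS AND PROOFS =====


-- step of A's second loop, abstracted over the (already computed) last_idx dict L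
def pvStepA (L : PySem.Dict Int Int) (d : PySem.Dict Int Int) (t : Int × String × Int) : PySem.Dict Int Int :=
  if d.contains t.1 then
    if d.getD t.1 0 > t.2.2 then
      if L.getD t.2.2 0 > t.1 then d else d.insert t.1 t.2.2
    else d.insert t.1 t.2.2
  else d.insert t.1 t.2.2

def pvStepG (d : PySem.Dict Int (List Int)) (t : Int × String × Int) : PySem.Dict Int (List Int) :=
  d.modify t.1 [] (fun ms => ms ++ [t.2.2])

-- B's per-index reduction
def pvRed (L : PySem.Dict Int Int) (idx : Int) (ms : List Int) : Int :=
  (ms.tail).foldl (fun cur mid => if cur > mid ∧ L.getD mid 0 > idx then cur else mid) (ms.headD 0)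

lemma pvModify_eq_insert (d : PySem.Dict Int (List Int)) (k : Int) (d0 : List Int)
    (f : List Int → List Int) : d.modify k d0 f = d.insert k (f (d.getD k d0)) :=
  PySem.Dict.ext_iff.mpr rfl

lemma pvRed_append (L : PySem.Dict Int Int) (idx m : Int) (ms : List Int) (h : ms ≠ []) :
    pvRed L idx (ms ++ [m]) =
      (if pvRed L idx ms > m ∧ L.getD m 0 > idx then pvRed L idx ms else m) := by
  obtain ⟨a, ms, rfl⟩ := List.exists_cons_of_ne_nil h
  simp [pvRed, List.foldl_append]

def pvL (comparisons : List (Int × String × Int)) : PySem.Dict Int Int :=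
  comparisons.foldl (fun d t =>
    if d.contains t.2.2 then
      if t.1 > d.getD t.2.2 0 then d.insert t.2.2 t.1 else d
    else d.insert t.2.2 t.1) PySem.Dict.empty

lemma pvPortA_eq (c : List (Int × String × Int)) :
    last_comparisons c = (c.foldl (pvStepA (pvL c)) PySem.Dict.empty).items := rfl

lemma pvPortB_eq (c : List (Int × String × Int)) :
    last_comparisons_alt c =
      ((c.foldl pvStepG PySem.Dict.empty).items.foldl
        (fun r p => r.insert p.1 (pvRed (pvL c) p.1 p.2)) PySem.Dict.empty).items := rfl

lemma pvNodupG (c : List (Int × String × Int)) :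
    ((c.foldl pvStepG PySem.Dict.empty).items.map (fun p => p.1)).Nodup := by
  have := PySem.Dict.nodup_keys_foldl_modify_key c (fun t => t.1) []
    (fun _ t => fun ms => ms ++ [t.2.2]) PySem.Dict.empty PySem.Dict.nodup_keys_empty
  simpa [pvStepG, PySem.Dict.keys] using this

lemma pvMain (L : PySem.Dict Int Int) (l : List (Int × String × Int)) :
    (l.foldl (pvStepA L) PySem.Dict.empty).items
        = (l.foldl pvStepG PySem.Dict.empty).items.map (fun p => (p.1, pvRed L p.1 p.2))
    ∧ ∀ p ∈ (l.foldl pvStepG PySem.Dict.empty).items, p.2 ≠ [] := by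
  induction l using List.reverseRecOn with
  | nil => exact ⟨rfl, by intro p hp; simp [PySem.Dict.empty] at hp⟩
  | append_singleton l t ih =>
    obtain ⟨ih1, ih2⟩ := ih
    have hndG := pvNodupG l
    rw [List.foldl_append, List.foldl_append]
    simp only [List.foldl_cons, List.foldl_nil]
    generalize hGA : List.foldl (pvStepA L) PySem.Dict.empty l = GA at ih1
    generalize hG : List.foldl pvStepG PySem.Dict.empty l = G at ih1 ih2 hndG
    have hkeys : GA.items.map (fun p => p.1) = G.items.map (fun p => p.1) := by
      rw [ih1, List.map_map]
      rfl
    have hndGA : (GA.items.map (fun p => p.1)).Nodup := hkeys ▸ hndG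
    have hkeys' : GA.keys = G.keys := by
      simp only [PySem.Dict.keys]
      exact hkeys
    have hcont : GA.contains t.1 = G.contains t.1 := by
      rw [PySem.Dict.contains_eq_decide_mem_keys, PySem.Dict.contains_eq_decide_mem_keys, hkeys']
    cases hc : G.contains t.1 with
    | false =>
      have hGAc : GA.contains t.1 = false := hcont.trans hc
      have hstepG : pvStepG G t = G.insert t.1 [t.2.2] := by
        rw [pvStepG, pvModify_eq_insert, PySem.Dict.getD_of_not_contains _ _ hc]
        rfl
      have hstepA : pvStepA L GA t = GA.insert t.1 t.2.2 := by
        simp [pvStepA, hGAc]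
      rw [hstepA, hstepG, PySem.Dict.items_insert_of_not_contains _ _ hGAc,
          PySem.Dict.items_insert_of_not_contains _ _ hc]
      constructor
      · rw [List.map_append, ih1]
        simp [pvRed]
      · intro p hp
        rcases List.mem_append.mp hp with h | h
        · exact ih2 p h
        · simp only [List.mem_singleton] at h
          subst h
          simp
    | true =>
      have hGAc : GA.contains t.1 = true := hcont.trans hc
      obtain ⟨ms, hms⟩ : ∃ ms, G.get? t.1 = some ms := by
        have h := PySem.Dict.contains_eq_isSome_get? G t.1
        rw [hc] at h
        cases hg : G.get? t.1 with
        | none => rw [hg] at h; simp at h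
        | some v => exact ⟨v, rfl⟩
      have hmem : (t.1, ms) ∈ G.items := PySem.Dict.mem_items_of_get?_eq_some G hms
      have hndG' : G.keys.Nodup := by simpa [PySem.Dict.keys] using hndG
      have hndGA' : GA.keys.Nodup := by simpa [PySem.Dict.keys] using hndGA
      have hGD : G.getD t.1 [] = ms := PySem.Dict.getD_of_mem_items G hmem hndG' []
      have hmsne : ms ≠ [] := ih2 _ hmem
      have hmemA : (t.1, pvRed L t.1 ms) ∈ GA.items := by
        rw [ih1]
        exact List.mem_map_of_mem hmem
      have hcur : GA.getD t.1 0 = pvRed L t.1 ms := PySem.Dict.getD_of_mem_items GA hmemA hndGA' 0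
      have hval : ∀ p ∈ G.items, p.1 = t.1 → p.2 = ms := by
        intro p hp hpk
        have h := PySem.Dict.get?_of_mem_items G hp hndG'
        rw [hpk, hms] at h
        exact (Option.some.injEq _ _ ▸ h).symm
      have hstepG : pvStepG G t = G.insert t.1 (ms ++ [t.2.2]) := by
        rw [pvStepG, pvModify_eq_insert, hGD]
      rw [hstepG, PySem.Dict.items_insert_of_contains _ _ hc]
      refine ⟨?_, ?_⟩
      · by_cases hcond : pvRed L t.1 ms > t.2.2 ∧ L.getD t.2.2 0 > t.1
        · have hstepA : pvStepA L GA t = GA := by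
            simp only [pvStepA, hGAc, if_true, hcur]
            rw [if_pos hcond.1, if_pos hcond.2]
          rw [hstepA, List.map_map, ih1]
          apply List.map_congr_left
          intro p hp
          by_cases hpk : p.1 = t.1
          · obtain ⟨p1, p2⟩ := p
            have hp2 := hval _ hp hpk
            simp only at hpk hp2
            subst hpk
            subst hp2
            simp only [Function.comp_apply, beq_self_eq_true, if_true]
            rw [pvRed_append L t.1 t.2.2 _ hmsne, if_pos hcond]
          · simp [Function.comp, hpk]
        · have hstepA : pvStepA L GA t = GA.insert t.1 t.2.2 := by
            simp only [pvStepA, hGAc, if_true, hcur]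
            split_ifs with h1 h2
            · exact absurd ⟨h1, h2⟩ hcond
            · rfl
            · rfl
          rw [hstepA, PySem.Dict.items_insert_of_contains _ _ hGAc, ih1,
              List.map_map, List.map_map]
          apply List.map_congr_left
          intro p hp
          by_cases hpk : p.1 = t.1
          · obtain ⟨p1, p2⟩ := p
            have hp2 := hval _ hp hpk
            simp only at hpk hp2
            subst hpk
            subst hp2
            simp only [Function.comp_apply, beq_self_eq_true, if_true]
            rw [pvRed_append L t.1 t.2.2 _ hmsne, if_neg hcond]
          · simp [Function.comp, hpk]
      · intro p hp
        rcases List.mem_map.mp hp with ⟨q, hq, hqe⟩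
        by_cases hqk : q.1 = t.1
        · rw [if_pos (by exact beq_iff_eq.mpr hqk)] at hqe
          rw [← hqe]
          simp
        · rw [if_neg (by simpa using hqk)] at hqe
          exact hqe ▸ ih2 q hq

-- ===== VERDICT (by name: the statement is the Claim_ definition above) =====
theorem last_comparisons_spec : Claim_equal_last_comparisons := by
  intro c _
  unfold Spec_last_comparisons
  rw [pvPortA_eq, pvPortB_eq]
  rw [PySem.Dict.items_foldl_insert_fresh (c.foldl pvStepG PySem.Dict.empty).items
        (fun p => p.1) (fun p => pvRed (pvL c) p.1 p.2)
        PySem.Dict.empty (fun a _ => PySem.Dict.contains_empty a.1) (pvNodupG c)]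
  simpa using (pvMain (pvL c) c).1
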